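-- pv_equiv track=rewrite | github.com/SamyarSS80/aoe4-tournament-manager | core/services.py | bracket_seed_positions
-- ===== SOURCE A (Python) =====
-- def bracket_seed_positions(size: int) -> list[int]:
--     def rec(n: int) -> list[int]:
--         if n == 1:
--             return [1]
--         prev = rec(n // 2)
--         out = []
--         for s in prev:
--             out.append(s)
--             out.append(n + 1 - s)
--         return out
--
--     return rec(size)
-- ===== SOURCE B (Python) =====
-- def bracket_seed_positions(size: int) -> list[int]:
--     # iterative bottom-up build: descending chain of round sizes, then expand
--     chain = []
--     m = size
--     while m != 1:
--         chain.append(m)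
--         m //= 2
--     out = [1]
--     for n in reversed(chain):
--         new = []
--         for s in out:
--             new.append(s)
--             new.append(n + 1 - s)
--         out = new
--     return out
-- ===== Notes on version B (the rewrite author's own statement) =====
-- stated objective: alternative
-- what changed: Replaced A's top-down recursion with an iterative bottom-up build: first collect the descending chain of sizes with a while loop, then expand the seed list once per chain element; no recursion.
-- outside the precondition, e.g. on bracket_seed_positions(0): A raises RecursionError, B does not finish within the time limit
import Mathlib
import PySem

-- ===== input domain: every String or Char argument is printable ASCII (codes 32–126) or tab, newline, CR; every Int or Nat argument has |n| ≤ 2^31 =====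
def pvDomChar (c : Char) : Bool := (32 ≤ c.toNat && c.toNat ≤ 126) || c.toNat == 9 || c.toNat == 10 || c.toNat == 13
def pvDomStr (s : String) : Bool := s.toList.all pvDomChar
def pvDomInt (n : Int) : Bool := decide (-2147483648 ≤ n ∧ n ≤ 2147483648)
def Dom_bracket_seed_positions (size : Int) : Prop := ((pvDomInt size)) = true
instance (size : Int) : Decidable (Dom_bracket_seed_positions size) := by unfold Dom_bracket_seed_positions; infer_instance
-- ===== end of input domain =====

-- B replaces A's top-down recursion by an iterative bottom-up build (while-loop chain of sizes, then repeated expansion); same cost, no recursion.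

-- ===== PORT A =====
-- A's inner recursion rec(n); for n ≤ 0 Python recurses forever (RecursionError),
-- excluded by Pre_; the `n < 1` branch returning [1] is only to make the Lean function total there.
def bracketRecA (n : Int) : List Int :=
  if n = 1 then [1]
  else if _h : n < 1 then [1]
  else (bracketRecA (PySem.Int.floordiv n 2)).foldl (fun out s => out ++ [s, n + 1 - s]) []
termination_by n.toNat
decreasing_by
  rw [PySem.Int.floordiv_eq_ediv_of_pos (by omega : (0:Int) < 2)]
  omega

def bracket_seed_positions (size : Int) : List Int := bracketRecA size

-- ===== PORT B =====
-- the while loop: chain of sizes m, m//2, … while m ≠ 1; for m ≤ 0 Python loops forever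
-- (excluded by Pre_); the `m < 1` branch returning [] is only to make the Lean function total there.
def bracketChainB (m : Int) : List Int :=
  if m = 1 then []
  else if _h : m < 1 then []
  else m :: bracketChainB (PySem.Int.floordiv m 2)
termination_by m.toNat
decreasing_by
  rw [PySem.Int.floordiv_eq_ediv_of_pos (by omega : (0:Int) < 2)]
  omega

def bracket_seed_positions_alt (size : Int) : List Int :=
  (bracketChainB size).reverse.foldl
    (fun out n => out.foldl (fun new s => new ++ [s, n + 1 - s]) []) [1]

-- ===== PRECONDITION & SPEC =====
-- Pre_ excludes size ≤ 0, on which neither Python returns: A's recursion raises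
-- RecursionError and B's while loop never reaches 1 and runs forever.
def Pre_bracket_seed_positions (size : Int) : Prop := 1 ≤ size
instance (size : Int) : Decidable (Pre_bracket_seed_positions size) := by unfold Pre_bracket_seed_positions; infer_instance
def pvWitness_bracket_seed_positions : Int := 8

def Spec_bracket_seed_positions (size : Int) (out : List Int) : Prop := out = bracket_seed_positions_alt size
instance (size : Int) (out : List Int) : Decidable (Spec_bracket_seed_positions size out) := by unfold Spec_bracket_seed_positions; infer_instance

-- ===== CLAIM (what is proved, stated in full; the proofs are below) =====
def Claim_equal_bracket_seed_positions : Prop := ∀ (size : Int), Dom_bracket_seed_positions size → Pre_bracket_seed_positions size → Spec_bracket_seed_positions size (bracket_seed_positions size)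

-- ===== LEMMAS AND PROOFS =====

theorem bracket_key : ∀ (k : Nat) (n : Int), n.toNat = k → 1 ≤ n →
    bracketRecA n =
      (bracketChainB n).reverse.foldl
        (fun out m => out.foldl (fun new s => new ++ [s, m + 1 - s]) []) [1] := by
  intro k
  induction k using Nat.strong_induction_on with
  | _ k ih =>
    intro n hk hn
    by_cases h1 : n = 1
    · subst h1
      rw [bracketRecA, bracketChainB]
      norm_num
    · have h2 : 1 < n := lt_of_le_of_ne hn (Ne.symm h1)
      have hd : PySem.Int.floordiv n 2 = n / 2 :=
        PySem.Int.floordiv_eq_ediv_of_pos (by omega)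
      have hge : 1 ≤ PySem.Int.floordiv n 2 := by rw [hd]; omega
      have hlt : (PySem.Int.floordiv n 2).toNat < k := by
        rw [hd]; omega
      rw [bracketRecA, bracketChainB]
      simp only [h1, if_false]
      rw [dif_neg (by omega : ¬ n < 1), dif_neg (by omega : ¬ n < 1)]
      rw [ih _ hlt _ rfl hge]
      rw [List.reverse_cons, List.foldl_append]
      simp

-- ===== VERDICT (by name: the statement is the Claim_ definition above) =====
theorem bracket_seed_positions_spec : Claim_equal_bracket_seed_positions := by
  intro size _ hpre
  unfold Spec_bracket_seed_positions bracket_seed_positions bracket_seed_positions_alt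
  exact bracket_key size.toNat size rfl hpre
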